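-- pv_equiv track=rewrite | github.com/Wang-Yann/LeetCodeMe | python/1196_how-many-apples-can-you-put-into-the-basket.py | maxNumberOfApples
-- ===== SOURCE A (Python) =====
-- from typing import List
--
-- def maxNumberOfApples(arr: List[int]) -> int:
--     arr.sort()
--     ans = 0
--     cur_weight = 0
--     for w in arr:
--         cur_weight += w
--         if cur_weight > 5000:
--             break
--         ans += 1
--     return ans
-- ===== SOURCE B (Python) =====
-- from typing import List
--
-- def maxNumberOfApples(arr: List[int]) -> int:
--     # Bucket by weight, then consume whole groups of equal weight arithmetically.
--     cnt = {}
--     for w in arr: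
--         cnt[w] = cnt.get(w, 0) + 1
--     ans = 0
--     cur = 0
--     for w in sorted(cnt):
--         c = cnt[w]
--         if w <= 0:
--             ans += c
--             cur += w * c
--         else:
--             k = (5000 - cur) // w
--             if k >= c:
--                 ans += c
--                 cur += w * c
--             else:
--                 ans += k
--                 break
--     return ans
-- ===== Notes on version B (the rewrite author's own statement) =====
-- stated objective: alternative
-- what changed: B replaces A's sort-then-per-element greedy walk by a one-pass frequency dict plus a loop over the sorted distinct weights that takes each whole group at once arithmetically (min(count, (5000-cur)//w) copies, with a closed-form budget update) instead of one apple per iteration; A also sorts arr in place, B does not mutate it.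
import Mathlib
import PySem

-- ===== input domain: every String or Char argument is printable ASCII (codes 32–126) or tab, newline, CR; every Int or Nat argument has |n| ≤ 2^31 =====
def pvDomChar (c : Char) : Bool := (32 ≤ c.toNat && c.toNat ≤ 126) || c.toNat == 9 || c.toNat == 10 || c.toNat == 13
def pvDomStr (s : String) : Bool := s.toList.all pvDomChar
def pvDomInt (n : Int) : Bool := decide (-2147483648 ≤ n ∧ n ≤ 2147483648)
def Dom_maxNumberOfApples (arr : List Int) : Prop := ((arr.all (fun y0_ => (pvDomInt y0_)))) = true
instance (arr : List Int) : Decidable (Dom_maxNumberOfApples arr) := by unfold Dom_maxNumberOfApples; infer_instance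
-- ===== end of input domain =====

-- B buckets the weights in a frequency dict and consumes each group of equal weights at once by
-- arithmetic ((5000-cur)//w copies), instead of A's per-element walk over the fully sorted list
-- (an alternative algorithm over the distinct weights; not measured faster).
-- A sorts arr in place (observable mutation), B does not — the equivalence proved is about the return value only.

-- ===== PORT A =====
-- A's for-loop with break; state (ans, cur_weight)
def maxNumberOfApplesLoop (ws : List Int) (ans : Int) (curWeight : Int) : Int :=
  match ws with
  | [] => ans
  | w :: rest =>
    let curWeight := curWeight + w
    if curWeight > 5000 then ans
    else maxNumberOfApplesLoop rest (ans + 1) curWeight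

def maxNumberOfApples (arr : List Int) : Int :=
  maxNumberOfApplesLoop (PySem.List.sorted arr (fun x => x) false) 0 0

-- ===== PORT B =====
-- B's loop over the sorted distinct weights; state (ans, cur)
def maxApplesGroupLoop (ks : List Int) (cnt : PySem.Dict Int Int) (ans : Int) (cur : Int) : Int :=
  match ks with
  | [] => ans
  | w :: rest =>
    let c := cnt.getD w 0
    if w ≤ 0 then maxApplesGroupLoop rest cnt (ans + c) (cur + w * c)
    else
      let k := PySem.Int.floordiv (5000 - cur) w
      if k ≥ c then maxApplesGroupLoop rest cnt (ans + c) (cur + w * c)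
      else ans + k

def maxNumberOfApples_alt (arr : List Int) : Int :=
  let cnt := arr.foldl (fun d x => d.insert x (d.getD x 0 + 1)) PySem.Dict.empty
  maxApplesGroupLoop (PySem.List.sorted cnt.keys (fun x => x) false) cnt 0 0

-- ===== PRECONDITION & SPEC =====
def Spec_maxNumberOfApples (arr : List Int) (out : Int) : Prop := out = maxNumberOfApples_alt arr
instance (arr : List Int) (out : Int) : Decidable (Spec_maxNumberOfApples arr out) := by unfold Spec_maxNumberOfApples; infer_instance

-- ===== CLAIM (what is proved, stated in full; the proofs are below) =====
def Claim_equal_maxNumberOfApples : Prop := ∀ (arr : List Int), Dom_maxNumberOfApples arr → Spec_maxNumberOfApples arr (maxNumberOfApples arr)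

-- ===== LEMMAS AND PROOFS =====

-- A's loop through a group of c copies of a nonpositive weight takes all of them.
theorem loopA_replicate_nonpos (w : Int) (hw : w ≤ 0) (c : Nat) (rest : List Int)
    (ans cur : Int) (hcur : cur ≤ 5000) :
    maxNumberOfApplesLoop (List.replicate c w ++ rest) ans cur =
      maxNumberOfApplesLoop rest (ans + c) (cur + w * c) := by
  induction c generalizing ans cur with
  | zero => simp
  | succ n ih =>
    have h1 : ¬ (cur + w > 5000) := by omega
    simp only [List.replicate_succ, List.cons_append, maxNumberOfApplesLoop, h1, if_false]
    rw [ih (ans + 1) (cur + w) (by omega)]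
    congr 1 <;> push_cast <;> ring

theorem nonpos_sum_le (w : Int) (hw : w ≤ 0) (c : Nat) (cur : Int) (hcur : cur ≤ 5000) :
    cur + w * c ≤ 5000 := by
  have : w * (c : Int) ≤ 0 := mul_nonpos_of_nonpos_of_nonneg hw (by positivity)
  omega

-- A's loop through a group of c copies of a positive weight w takes min(c, (5000-cur)//w):
-- all c if c ≤ (5000-cur)//w, else it stops inside the group with (5000-cur)//w more apples.
theorem loopA_replicate_pos (w : Int) (hw : 0 < w) (c : Nat) (rest : List Int)
    (ans cur : Int) (hcur : cur ≤ 5000) :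
    maxNumberOfApplesLoop (List.replicate c w ++ rest) ans cur =
      if (c : Int) ≤ PySem.Int.floordiv (5000 - cur) w then
        maxNumberOfApplesLoop rest (ans + c) (cur + w * c)
      else ans + PySem.Int.floordiv (5000 - cur) w := by
  induction c generalizing ans cur with
  | zero =>
    have h0 : (0 : Int) ≤ PySem.Int.floordiv (5000 - cur) w := by
      rw [PySem.Int.le_floordiv_iff_mul_le hw]; omega
    simp [h0, List.nil_append]
  | succ n ih =>
    simp only [List.replicate_succ, List.cons_append, maxNumberOfApplesLoop]
    by_cases hb : cur + w > 5000
    · -- first apple of the group already overflows: floordiv = 0, group contributes nothing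
      have hk0 : PySem.Int.floordiv (5000 - cur) w = 0 := by
        have h1 : PySem.Int.floordiv (5000 - cur) w < 1 := by
          rw [PySem.Int.floordiv_lt_iff_lt_mul hw]; omega
        have h2 : (0 : Int) ≤ PySem.Int.floordiv (5000 - cur) w := by
          rw [PySem.Int.le_floordiv_iff_mul_le hw]; omega
        omega
      have : ¬ ((n : Int) + 1 ≤ PySem.Int.floordiv (5000 - cur) w) := by
        rw [hk0]; push_cast; omega
      simp only [hb, if_true]
      rw [if_neg (by omega), hk0, add_zero]
    · have hb' : ¬ (cur + w > 5000) := hb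
      simp only [hb', if_false]
      rw [ih (ans + 1) (cur + w) (by omega)]
      -- (5000 - (cur+w)) // w = (5000 - cur) // w - 1
      have hstep : PySem.Int.floordiv (5000 - (cur + w)) w =
          PySem.Int.floordiv (5000 - cur) w - 1 := by
        rw [PySem.Int.floordiv_eq_ediv_of_pos hw, PySem.Int.floordiv_eq_ediv_of_pos hw]
        have : 5000 - (cur + w) = (5000 - cur) + (-1) * w := by ring
        rw [this, Int.add_mul_ediv_right _ _ (by omega)]
        ring
      rw [hstep]
      by_cases hc : (n : Int) ≤ PySem.Int.floordiv (5000 - cur) w - 1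
      · rw [if_pos hc, if_pos (by push_cast; omega)]
        congr 1 <;> push_cast <;> ring
      · rw [if_neg hc, if_neg (by push_cast; omega)]
        have hk1 : (1 : Int) ≤ PySem.Int.floordiv (5000 - cur) w := by
          rw [PySem.Int.le_floordiv_iff_mul_le hw]; omega
        omega

-- if a positive group is fully taken, the budget is still respected
theorem pos_group_budget (w : Int) (hw : 0 < w) (c : Nat) (cur : Int)
    (h : (c : Int) ≤ PySem.Int.floordiv (5000 - cur) w) : cur + w * c ≤ 5000 := by
  rw [PySem.Int.le_floordiv_iff_mul_le hw] at h
  nlinarith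

-- the core correspondence: A's loop over the concatenation of the groups equals B's group loop
theorem loopA_flat_eq_groupLoop (cnt : PySem.Dict Int Int) (ks : List Int)
    (hpos : ∀ w ∈ ks, 0 ≤ cnt.getD w 0) (ans cur : Int) (hcur : cur ≤ 5000) :
    maxNumberOfApplesLoop (ks.flatMap (fun w => List.replicate (cnt.getD w 0).toNat w)) ans cur =
      maxApplesGroupLoop ks cnt ans cur := by
  induction ks generalizing ans cur with
  | nil => simp [maxNumberOfApplesLoop, maxApplesGroupLoop]
  | cons w rest ih =>
    have hc0 : (0 : Int) ≤ cnt.getD w 0 := hpos w (by simp)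
    have hcast : ((cnt.getD w 0).toNat : Int) = cnt.getD w 0 := Int.toNat_of_nonneg hc0
    simp only [List.flatMap_cons, maxApplesGroupLoop]
    by_cases hw : w ≤ 0
    · rw [loopA_replicate_nonpos w hw _ _ ans cur hcur, if_pos hw, hcast,
        ih (fun v hv => hpos v (by simp [hv])) _ _
          (by have := nonpos_sum_le w hw (cnt.getD w 0).toNat cur hcur; rw [hcast] at this; exact this)]
    · have hw' : 0 < w := by omega
      rw [loopA_replicate_pos w hw' _ _ ans cur hcur, if_neg hw]
      by_cases hk : (((cnt.getD w 0).toNat : Nat) : Int) ≤ PySem.Int.floordiv (5000 - cur) w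
      · rw [if_pos hk, hcast, if_pos (by rw [hcast] at hk; exact hk),
          ih (fun v hv => hpos v (by simp [hv])) _ _
            (by have := pos_group_budget w hw' (cnt.getD w 0).toNat cur hk; rw [hcast] at this; exact this)]
      · rw [if_neg hk, if_neg (by rw [hcast] at hk; exact hk)]

-- count of an element in the flattened groups
theorem count_flatMap_replicate (ks : List Int) (c : Int → Nat) (hnd : ks.Nodup) (x : Int) :
    (ks.flatMap (fun w => List.replicate (c w) w)).count x = if x ∈ ks then c x else 0 := by
  induction ks with
  | nil => simp
  | cons w rest ih =>
    simp only [List.flatMap_cons, List.count_append, List.count_replicate,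
      ih (List.nodup_cons.mp hnd).2, List.mem_cons]
    rcases List.nodup_cons.mp hnd with ⟨hw, _⟩
    by_cases hx : x = w
    · subst hx; simp [hw]
    · simp [hx, Ne.symm hx]

-- the flattened groups, keys strictly increasing, are pairwise ≤
theorem pairwise_flatMap_replicate (ks : List Int) (c : Int → Nat)
    (h : ks.Pairwise (· < ·)) :
    (ks.flatMap (fun w => List.replicate (c w) w)).Pairwise (· ≤ ·) := by
  induction h with
  | nil => simp
  | @cons w rest hw hr ih =>
    simp only [List.flatMap_cons]
    rw [List.pairwise_append]
    refine ⟨List.pairwise_replicate.mpr (Or.inr le_rfl), ih, ?_⟩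
    intro a ha b hb
    rcases List.eq_of_mem_replicate ha with rfl
    rcases List.mem_flatMap.mp hb with ⟨z, hz, hbz⟩
    rcases List.eq_of_mem_replicate hbz with rfl
    exact le_of_lt (hw _ hz)

-- sorted(arr) is exactly the concatenation of the groups over the sorted distinct weights
theorem sorted_eq_flat (arr : List Int) :
    PySem.List.sorted arr (fun x => x) false =
      (PySem.List.sorted (PySem.Set.ofList arr) (fun x => x) false).flatMap
        (fun w => List.replicate (arr.count w) w) := by
  set ks := PySem.List.sorted (PySem.Set.ofList arr) (fun x => x) false with hks
  have hlt : ks.Pairwise (· < ·) := PySem.List.sorted_ofList_pairwise_lt arr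
  have hnd : ks.Nodup := hlt.imp ne_of_lt
  have hmem : ∀ x, x ∈ ks ↔ x ∈ arr := by
    intro x
    rw [hks, PySem.List.mem_sorted, PySem.Set.mem_ofList]
  apply PySem.List.sorted_id_eq_of_perm_of_pairwise
  · rw [List.perm_iff_count]
    intro x
    rw [count_flatMap_replicate ks (fun w => arr.count w) hnd x]
    by_cases hx : x ∈ ks
    · simp [hx]
    · simp [hx, List.count_eq_zero.mpr (by rw [← hmem]; exact hx)]
  · exact pairwise_flatMap_replicate ks (fun w => arr.count w) hlt

-- ===== VERDICT (by name: the statement is the Claim_ definition above) =====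
theorem maxNumberOfApples_spec : Claim_equal_maxNumberOfApples := by
  intro arr _
  unfold Spec_maxNumberOfApples maxNumberOfApples
  have halt : maxNumberOfApples_alt arr =
      maxApplesGroupLoop (PySem.List.sorted (PySem.Dict.counter arr).keys (fun x => x) false)
        (PySem.Dict.counter arr) 0 0 := rfl
  rw [halt, PySem.Dict.keys_counter]
  have hgetD : ∀ w, (PySem.Dict.counter arr).getD w 0 = (arr.count w : Int) :=
    fun w => PySem.Dict.getD_counter arr w
  rw [sorted_eq_flat arr,
    show (fun w => List.replicate (arr.count w) w) =
      (fun w => List.replicate ((PySem.Dict.counter arr).getD w 0).toNat w) by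
        funext w; rw [hgetD w]; simp]
  exact loopA_flat_eq_groupLoop (PySem.Dict.counter arr) _
    (fun w _ => by rw [hgetD w]; positivity) 0 0 (by norm_num)
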